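-- pv_equiv track=rewrite | github.com/severinbratus/puzzles | g/02/solve.py | solution
-- ===== SOURCE A (Python) =====
-- from collections import Counter
-- from math import inf
--
-- def solution(A):
--     counter = Counter(A)
--
--     # Discard unmatchable side lengths
--     keys = sorted(key for key in counter.keys() if counter[key] >= 2)
--     if not keys:
--         return -1
--
--     # Case #1: square
--     for key in keys:
--         if counter[key] >= 4:
--             return 0
--
--     if len(keys) == 1:
--         return -1
--
--     # Case #2: rectangle
--     result = inf
--     for key, next_key in zip(keys, keys[1:]):
--         result = min(result, next_key - key)
--
--     return result
-- ===== SOURCE B (Python) =====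
-- def solution(A):
--     # Sort once; equal values become contiguous runs, so run lengths replace the Counter.
--     s = sorted(A)
--     prev = None
--     run = 0
--     cands = []
--     for x in s:
--         if prev is not None and x == prev:
--             run += 1
--         else:
--             prev = x
--             run = 1
--         if run == 4:
--             return 0          # a square is possible
--         if run == 2:
--             cands.append(x)   # x has at least one usable pair
--     if len(cands) < 2:
--         return -1
--     best = cands[1] - cands[0]
--     for a, b in zip(cands, cands[1:]):
--         d = b - a
--         if d < best:
--             best = d
--     return best
-- ===== Notes on version B (the rewrite author's own statement) =====
-- stated objective: alternative
-- what changed: Replaces the Counter hash map with a single sort followed by a run-length scan of equal consecutive values (early 0 on a run of 4, candidates emitted already sorted), so no dictionary is built and no separate sorted() pass over filtered keys is needed.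
import Mathlib
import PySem

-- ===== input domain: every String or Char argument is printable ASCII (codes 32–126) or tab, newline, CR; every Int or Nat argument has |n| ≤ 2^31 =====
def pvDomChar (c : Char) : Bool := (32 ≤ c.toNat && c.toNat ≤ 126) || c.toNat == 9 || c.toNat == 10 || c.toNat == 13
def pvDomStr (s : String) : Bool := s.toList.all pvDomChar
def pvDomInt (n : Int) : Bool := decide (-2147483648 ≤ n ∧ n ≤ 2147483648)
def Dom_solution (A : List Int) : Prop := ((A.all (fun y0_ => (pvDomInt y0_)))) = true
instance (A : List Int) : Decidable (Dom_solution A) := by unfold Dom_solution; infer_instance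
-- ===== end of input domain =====

-- B sorts the list once and scans runs of equal consecutive values instead of building a Counter; objective: alternative decomposition (same asymptotic cost).


-- ===== PORT A =====
def solution (A : List Int) : Int :=
  let counter := PySem.Dict.counter A
  -- keys = sorted(key for key in counter.keys() if counter[key] >= 2)
  let keys := PySem.List.sorted ((counter.keys).filter (fun k => decide (2 ≤ counter.getD k 0))) (fun x => x) false
  if keys = [] then -1
  else if keys.any (fun k => decide (4 ≤ counter.getD k 0)) then 0
  else if keys.length = 1 then -1
  else
    -- result = inf; the fold's `none` plays inf.  On this branch |keys| ≥ 2, so the zip is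
    -- nonempty, the fold ends in `some`, and the `.getD 0` is never taken (Python never
    -- returns the float inf here).
    ((keys.zip (PySem.List.slice keys (some 1))).foldl
      (fun r p => some (match r with | none => p.2 - p.1 | some v => min v (p.2 - p.1))) none).getD 0

-- ===== PORT B =====
-- the for-loop of Source B over the sorted list: state (prev, run, cands); result `none` = early `return 0`
def scanB : List Int → Option Int → Int → List Int → Option (List Int)
  | [], _, _, cands => some cands
  | x :: s, prev, run, cands =>
    let run' := if prev = some x then run + 1 else 1
    if run' = 4 then none
    else scanB s (some x) run' (if run' = 2 then cands ++ [x] else cands)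

def solution_alt (A : List Int) : Int :=
  let s := PySem.List.sorted A (fun x => x) false
  match scanB s none 0 [] with
  | none => 0
  | some cands =>
    if cands.length < 2 then -1
    else
      -- best = cands[1] - cands[0]  (both indices in range: length ≥ 2)
      let best := PySem.List.pyGetD cands 1 0 - PySem.List.pyGetD cands 0 0
      (cands.zip (PySem.List.slice cands (some 1))).foldl
        (fun best p => if p.2 - p.1 < best then p.2 - p.1 else best) best

-- ===== PRECONDITION & SPEC =====
def Spec_solution (A : List Int) (out : Int) : Prop := out = solution_alt A
instance (A : List Int) (out : Int) : Decidable (Spec_solution A out) := by unfold Spec_solution; infer_instance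

-- ===== CLAIM (what is proved, stated in full; the proofs are below) =====
def Claim_equal_solution : Prop := ∀ (A : List Int), Dom_solution A → Spec_solution A (solution A)

-- ===== LEMMAS AND PROOFS =====

-- "run-adjusted count" of x: occurrences of x still ahead in the tail s, plus the current run r if x is the running value v
def tcount (v r : Int) (s : List Int) (x : Int) : Int :=
  (if x = v then r else 0) + (s.count x : Int)

-- invariant of scanB over a sorted tail s: it returns `none` iff some value reaches total count 4,
-- and otherwise its candidate list is strictly increasing and holds exactly the values of total count ≥ 2
theorem scan_main (s : List Int) : ∀ (v r : Int) (cands : List Int),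
    (v :: s).Pairwise (· ≤ ·) → 1 ≤ r → r ≤ 3 →
    ((2 ≤ r ∧ ∃ c', cands = c' ++ [v] ∧ ∀ y ∈ c', y < v) ∨ (r = 1 ∧ ∀ y ∈ cands, y < v)) →
    cands.Pairwise (· < ·) →
    ((∃ x ∈ v :: s, 4 ≤ tcount v r s x) → scanB s (some v) r cands = none) ∧
    (¬ (∃ x ∈ v :: s, 4 ≤ tcount v r s x) →
      ∃ l, scanB s (some v) r cands = some l ∧ l.Pairwise (· < ·) ∧
        ∀ x, (x ∈ l ↔ x ∈ cands ∨ 2 ≤ tcount v r s x)) := by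
  induction s with
  | nil =>
    intro v r cands _ hr1 hr3 hinv hpw
    constructor
    · rintro ⟨x, hx, hct⟩
      simp only [List.mem_singleton] at hx
      subst hx
      simp [tcount] at hct
      omega
    · intro _
      refine ⟨cands, rfl, hpw, fun x => ?_⟩
      constructor
      · exact Or.inl
      · rintro (h | h)
        · exact h
        · by_cases hxv : x = v
          · subst hxv
            simp [tcount] at h
            rcases hinv with ⟨_, c', rfl, _⟩ | ⟨hr, _⟩
            · simp
            · omega
          · simp [tcount, hxv] at h
  | cons x s ih =>
    intro v r cands hpw hr1 hr3 hinv hcpw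
    have hcv : ∀ y ∈ cands, y ≤ v := by
      rcases hinv with ⟨_, c', rfl, hlt⟩ | ⟨_, hlt⟩
      · intro y hy
        rcases List.mem_append.mp hy with h | h
        · exact le_of_lt (hlt y h)
        · simp at h; omega
      · exact fun y hy => le_of_lt (hlt y hy)
    by_cases hvx : v = x
    · subst hvx
      have hscan : scanB (v :: s) (some v) r cands
          = if r + 1 = 4 then none
            else scanB s (some v) (r + 1) (if r + 1 = 2 then cands ++ [v] else cands) := by
        simp [scanB]
      have hpw' : (v :: s).Pairwise (· ≤ ·) := hpw.of_cons
      have ht : ∀ y, tcount v (r + 1) s y = tcount v r (v :: s) y := by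
        intro y
        by_cases hy : y = v <;> simp [tcount, hy, List.count_cons] <;> push_cast <;> omega
      by_cases hr4 : r = 3
      · subst hr4
        rw [hscan, if_pos (by norm_num : (3:Int) + 1 = 4)]
        refine ⟨fun _ => rfl, fun hno => absurd ?_ hno⟩
        refine ⟨v, by simp, ?_⟩
        simp [tcount, List.count_cons]
        push_cast
        omega
      · have hne4 : r + 1 ≠ 4 := by omega
        rw [hscan, if_neg hne4]
        have hinv' : (2 ≤ r + 1 ∧ ∃ c', (if r + 1 = 2 then cands ++ [v] else cands) = c' ++ [v] ∧ ∀ y ∈ c', y < v)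
            ∨ (r + 1 = 1 ∧ ∀ y ∈ (if r + 1 = 2 then cands ++ [v] else cands), y < v) := by
          rcases hinv with ⟨hr2', c', hc, hlt⟩ | ⟨hr1', hlt⟩
          · have h2 : r + 1 ≠ 2 := by omega
            rw [if_neg h2]
            exact Or.inl ⟨by omega, c', hc, hlt⟩
          · subst hr1'
            exact Or.inl ⟨by norm_num, cands, by norm_num, hlt⟩
        have hcpw' : (if r + 1 = 2 then cands ++ [v] else cands).Pairwise (· < ·) := by
          split
          · refine List.pairwise_append.mpr ⟨hcpw, by simp, ?_⟩
            intro a ha b hb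
            simp at hb
            subst hb
            rcases hinv with ⟨hr2', _, _, _⟩ | ⟨_, hlt⟩
            · omega
            · exact hlt a ha
          · exact hcpw
        obtain ⟨IH1, IH2⟩ := ih v (r + 1) _ hpw' (by omega) (by omega) hinv' hcpw'
        constructor
        · rintro ⟨y, hy, h4⟩
          apply IH1
          refine ⟨y, by simpa using hy, ?_⟩
          rw [ht y]; exact h4
        · intro hno
          obtain ⟨l, hsc, hlpw, hlmem⟩ := IH2 (by
            rintro ⟨y, hy, h4⟩
            exact hno ⟨y, by simp at hy ⊢; tauto, by rw [← ht y]; exact h4⟩)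
          refine ⟨l, hsc, hlpw, fun z => ?_⟩
          rw [hlmem z, ht z]
          by_cases h2 : r + 1 = 2
          · rw [if_pos h2]
            by_cases hz : z = v
            · have h2t : 2 ≤ tcount v r (v :: s) z := by
                simp [tcount, hz, List.count_cons]
                push_cast
                omega
              simp [h2t]
            · simp [hz]
          · rw [if_neg h2]
    · -- v ≠ x : a new run starts at x
      have hvltx : v < x := by
        have hle : v ≤ x := List.rel_of_pairwise_cons hpw (by simp)
        exact lt_of_le_of_ne hle hvx
      have hpw' : (x :: s).Pairwise (· ≤ ·) := hpw.of_cons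
      have hxall : ∀ y ∈ s, x ≤ y := fun y hy => List.rel_of_pairwise_cons hpw' hy
      have hvnot : v ∉ x :: s := by
        intro h
        rcases List.mem_cons.mp h with h | h
        · omega
        · have := hxall v h; omega
      have hvnots : v ∉ s := fun h => hvnot (List.mem_cons_of_mem _ h)
      have hc0 : List.count v s = 0 := List.count_eq_zero.mpr hvnots
      have hcx0 : List.count v (x :: s) = 0 := List.count_eq_zero.mpr hvnot
      have hscan : scanB (x :: s) (some v) r cands = scanB s (some x) 1 cands := by
        simp [scanB, hvx]
      have ht : ∀ y, y ≠ v → tcount x 1 s y = tcount v r (x :: s) y := by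
        intro y hy
        by_cases hyx : y = x <;> simp [tcount, hyx, hy, List.count_cons] <;> push_cast <;> omega
      have htv : tcount v r (x :: s) v = r := by
        simp [tcount, hcx0]
      obtain ⟨IH1, IH2⟩ := ih x 1 cands hpw' le_rfl (by omega)
        (Or.inr ⟨rfl, fun y hy => lt_of_le_of_lt (hcv y hy) hvltx⟩) hcpw
      constructor
      · rintro ⟨y, hy, h4⟩
        rw [hscan]
        apply IH1
        have hyne : y ≠ v := by
          intro h; subst h
          rw [htv] at h4; omega
        have hy' : y ∈ x :: s := by
          rcases List.mem_cons.mp hy with h | h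
          · exact absurd h hyne
          · exact h
        exact ⟨y, hy', by rw [ht y hyne]; exact h4⟩
      · intro hno
        rw [hscan]
        obtain ⟨l, hsc, hlpw, hlmem⟩ := IH2 (by
          rintro ⟨y, hy, h4⟩
          have hyne : y ≠ v := by intro h; subst h; exact hvnot hy
          exact hno ⟨y, List.mem_cons_of_mem _ hy, by rw [← ht y hyne]; exact h4⟩)
        refine ⟨l, hsc, hlpw, fun z => ?_⟩
        rw [hlmem z]
        by_cases hz : z = v
        · have hts : tcount x 1 s z = 0 := by
            simp [tcount, hz, hvx, hc0]
          rw [hts, hz, htv]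
          constructor
          · rintro (h | h)
            · exact Or.inl h
            · omega
          · rintro (h | h)
            · exact Or.inl h
            · rcases hinv with ⟨_, c', hc, _⟩ | ⟨hr1', _⟩
              · exact Or.inl (by simp [hc])
              · omega
        · rw [ht z hz]

-- A's min-fold (with `none` as inf) over consecutive pairs agrees with B's `if d < best` loop
theorem fold_min_eq (ps : List (Int × Int)) (b : Int) :
    ps.foldl (fun r p => some (match r with | none => p.2 - p.1 | some v => min v (p.2 - p.1))) (some b)
      = some (ps.foldl (fun best p => if p.2 - p.1 < best then p.2 - p.1 else best) b) := by
  induction ps generalizing b with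
  | nil => rfl
  | cons p ps ih =>
    simp only [List.foldl_cons, ih]
    have : min b (p.2 - p.1) = if p.2 - p.1 < b then p.2 - p.1 else b := by omega
    rw [this]

-- A's fold starting from `none` over a nonempty pair list, unwrapped
theorem fold_min_eq' (ps : List (Int × Int)) (q : Int × Int) :
    (List.foldl (fun r p => some (match r with | none => p.2 - p.1 | some v => min v (p.2 - p.1))) none (q :: ps)).getD 0
      = List.foldl (fun best p => if p.2 - p.1 < best then p.2 - p.1 else best) (q.2 - q.1) (q :: ps) := by
  rw [List.foldl_cons, List.foldl_cons]
  have h1 : (some (match (none : Option Int) with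
      | none => q.2 - q.1 | some v => min v (q.2 - q.1))) = some (q.2 - q.1) := rfl
  have h2 : (if q.2 - q.1 < q.2 - q.1 then q.2 - q.1 else q.2 - q.1) = q.2 - q.1 := by simp
  rw [h1, h2, fold_min_eq, Option.getD_some]

-- ===== VERDICT (by name: the statement is the Claim_ definition above) =====
theorem solution_spec : Claim_equal_solution := by
  unfold Claim_equal_solution Spec_solution
  intro A _
  rcases hs : PySem.List.sorted A (fun x => x) false with _ | ⟨v, s0⟩
  · have hA : A = [] := by
      have h := PySem.List.sorted_perm A (fun x => x) false
      rw [hs] at h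
      exact (List.Perm.nil_eq h).symm
    subst hA
    decide
  · have hpw : (v :: s0).Pairwise (· ≤ ·) := by
      have h := PySem.List.sorted_pairwise A (fun x => x)
      rwa [hs] at h
    have hperm : (v :: s0).Perm A := by
      have h := PySem.List.sorted_perm A (fun x => x) false
      rwa [hs] at h
    have hmemA : ∀ y : Int, y ∈ v :: s0 ↔ y ∈ A := fun y => hperm.mem_iff
    have ht : ∀ y, tcount v 1 s0 y = (A.count y : Int) := by
      intro y
      rw [← hperm.count_eq y]
      by_cases hy : y = v <;> simp [tcount, hy, List.count_cons] <;> push_cast <;> omega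
    obtain ⟨S1, S2⟩ := scan_main s0 v 1 [] hpw le_rfl (by omega) (Or.inr ⟨rfl, by simp⟩) (by simp)
    have hstep : scanB (v :: s0) none 0 [] = scanB s0 (some v) 1 [] := by simp [scanB]
    have hkeys_mem : ∀ k : Int, (k ∈ (PySem.Dict.counter A).keys.filter
        (fun k => decide (2 ≤ (PySem.Dict.counter A).getD k 0))) ↔ (k ∈ A ∧ 2 ≤ (A.count k : Int)) := by
      intro k
      simp [List.mem_filter, PySem.Dict.keys_counter, PySem.Set.mem_ofList, PySem.Dict.getD_counter]
    by_cases hbig : ∃ y ∈ A, 4 ≤ (A.count y : Int)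
    · -- some side length occurs ≥ 4 times: both return 0
      obtain ⟨y0, hy0A, hy04⟩ := hbig
      have hnone : scanB s0 (some v) 1 [] = none :=
        S1 ⟨y0, (hmemA y0).mpr hy0A, by rw [ht]; exact hy04⟩
      have hB : solution_alt A = 0 := by
        simp only [solution_alt, hs, hstep, hnone]
      have hy0keys : y0 ∈ PySem.List.sorted ((PySem.Dict.counter A).keys.filter
          (fun k => decide (2 ≤ (PySem.Dict.counter A).getD k 0))) (fun x => x) false := by
        rw [PySem.List.mem_sorted]
        exact (hkeys_mem y0).mpr ⟨hy0A, by omega⟩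
      have hA0 : solution A = 0 := by
        simp only [solution]
        rw [if_neg (List.ne_nil_of_mem hy0keys)]
        rw [if_pos]
        rw [List.any_eq_true]
        exact ⟨y0, hy0keys, by simp [PySem.Dict.getD_counter]; omega⟩
      rw [hA0, hB]
    · -- no count reaches 4
      obtain ⟨l, hscanl, hlpw, hlmem⟩ := S2 (by
        rintro ⟨y, hy, h4⟩
        exact hbig ⟨y, (hmemA y).mp hy, by rw [← ht y]; exact h4⟩)
      have hlmem' : ∀ z, z ∈ l ↔ 2 ≤ (A.count z : Int) := by
        intro z
        rw [hlmem z, ht z]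
        simp
      have hlnodup : l.Nodup := hlpw.imp (fun h => ne_of_lt h)
      have hfnodup : ((PySem.Dict.counter A).keys.filter
          (fun k => decide (2 ≤ (PySem.Dict.counter A).getD k 0))).Nodup := by
        rw [PySem.Dict.keys_counter]
        exact (PySem.Set.nodup_ofList A).filter _
      have hpermlf : l.Perm ((PySem.Dict.counter A).keys.filter
          (fun k => decide (2 ≤ (PySem.Dict.counter A).getD k 0))) := by
        rw [List.perm_ext_iff_of_nodup hlnodup hfnodup]
        intro a
        rw [hlmem' a, hkeys_mem a]
        constructor
        · intro h
          refine ⟨?_, h⟩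
          have : 0 < A.count a := by omega
          exact List.count_pos_iff.mp this
        · exact fun h => h.2
      have hkeysl : PySem.List.sorted ((PySem.Dict.counter A).keys.filter
          (fun k => decide (2 ≤ (PySem.Dict.counter A).getD k 0))) (fun x => x) false = l :=
        PySem.List.sorted_eq_of_perm_of_pairwise_lt _ l _ hpermlf hlpw
      have hanyf : (l.any (fun k => decide (4 ≤ (PySem.Dict.counter A).getD k 0))) = false := by
        rw [List.any_eq_false]
        intro k hk
        have hkA : k ∈ A := by
          have := (hlmem' k).mp hk
          exact List.count_pos_iff.mp (by omega)
        simp [PySem.Dict.getD_counter]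
        by_contra h
        push_neg at h
        exact hbig ⟨k, hkA, by omega⟩
      have hB : solution_alt A
          = (if l.length < 2 then (-1 : Int)
             else (l.zip (PySem.List.slice l (some 1))).foldl
               (fun best p => if p.2 - p.1 < best then p.2 - p.1 else best)
               (PySem.List.pyGetD l 1 0 - PySem.List.pyGetD l 0 0)) := by
        simp only [solution_alt, hs, hstep, hscanl]
      have hA' : solution A
          = (if l = [] then (-1 : Int)
             else if l.any (fun k => decide (4 ≤ (PySem.Dict.counter A).getD k 0)) then 0
             else if l.length = 1 then -1
             else ((l.zip (PySem.List.slice l (some 1))).foldl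
               (fun r p => some (match r with | none => p.2 - p.1 | some v => min v (p.2 - p.1))) none).getD 0) := by
        simp only [solution, hkeysl]
      rw [hA', hB]
      rcases l with _ | ⟨a, _ | ⟨b, rest⟩⟩
      · norm_num
      · rw [if_neg (by simp), hanyf]
        norm_num
      · rw [if_neg (by simp), hanyf]
        norm_num
        have hslice : PySem.List.slice (a :: b :: rest) (some 1) = b :: rest := by
          rw [PySem.List.slice_from _ (by norm_num)]
          rfl
        have hgb : PySem.List.pyGetD (a :: b :: rest) 1 0 = b := by
          simp [PySem.List.pyGetD, PySem.List.pyGet?, PySem.List.pyIdx?]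
        rw [hslice, hgb, List.zip_cons_cons]
        exact fold_min_eq' _ (a, b)
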